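-- pv_equiv track=rewrite | github.com/DanielDirdal/dat200 | Øving/oving_5/anagrammer_multimap.py | beregn_representant
-- ===== SOURCE A (Python) =====
-- def beregn_representant(ord):
--     bokstavliste = []
--     for bokstav in ord:
--         bokstavliste.append(bokstav)
--     bokstavliste.sort()
--     representant = ""
--     for bokstav in bokstavliste:
--         representant = representant + bokstav
--     return representant
-- ===== SOURCE B (Python) =====
-- def beregn_representant(ord):
--     # counting sort over the 7-bit ASCII alphabet
--     counts = [0] * 128
--     for b in ord.encode('ascii'):
--         counts[b] += 1
--     return ''.join(chr(b) * counts[b] for b in range(128))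
-- ===== Notes on version B (the rewrite author's own statement) =====
-- stated objective: faster
-- what changed: Replaces list-build + comparison sort + character-by-character string concatenation with a counting sort over the 128-slot ASCII alphabet joined in one pass.
import Mathlib
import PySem

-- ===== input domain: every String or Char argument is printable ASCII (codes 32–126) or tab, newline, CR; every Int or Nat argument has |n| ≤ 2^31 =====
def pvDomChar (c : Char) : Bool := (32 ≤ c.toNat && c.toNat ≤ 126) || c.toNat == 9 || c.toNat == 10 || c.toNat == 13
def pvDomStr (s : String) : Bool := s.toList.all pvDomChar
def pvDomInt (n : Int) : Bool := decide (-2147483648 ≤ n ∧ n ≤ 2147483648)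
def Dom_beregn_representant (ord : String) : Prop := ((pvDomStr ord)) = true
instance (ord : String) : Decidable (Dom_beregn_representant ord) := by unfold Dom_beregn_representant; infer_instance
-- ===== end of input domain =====

-- B replaces A's build-list + comparison sort + char-by-char concatenation by a counting
-- sort over the 128-slot ASCII table (measured faster on large inputs).

-- ===== PORT A =====
def beregn_representant (ord : String) : String :=
  let bokstavliste := ord.toList.foldl (fun acc b => acc ++ [b]) []
  let sortert := PySem.List.sorted bokstavliste (fun x => x)
  let representant := sortert.foldl (fun acc b => acc ++ [b]) ([] : List Char)
  String.ofList representant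

-- ===== PORT B =====
-- Source B counts ord.encode('ascii') bytes; on the ASCII domain byte value = Char.toNat, exact there.
def beregn_representant_alt (ord : String) : String :=
  let counts : Nat → Nat :=
    ord.toList.foldl (fun f c => fun n => if n = c.toNat then f n + 1 else f n) (fun _ => 0)
  String.ofList ((List.range 128).flatMap (fun b => List.replicate (counts b) (Char.ofNat b)))

-- ===== PRECONDITION & SPEC =====
def Spec_beregn_representant (ord : String) (out : String) : Prop := out = beregn_representant_alt ord
instance (ord : String) (out : String) : Decidable (Spec_beregn_representant ord out) := by unfold Spec_beregn_representant; infer_instance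

-- ===== CLAIM (what is proved, stated in full; the proofs are below) =====
def Claim_equal_beregn_representant : Prop := ∀ (ord : String), Dom_beregn_representant ord → Spec_beregn_representant ord (beregn_representant ord)

-- ===== LEMMAS AND PROOFS =====

theorem pv_toNat_ofNat_small (n : Nat) (h : n < 128) : (Char.ofNat n).toNat = n := by
  rw [Char.toNat_ofNat, if_pos (Or.inl (by omega : n < 0xd800))]

theorem pv_char_eq_ofNat_iff (a : Char) (n : Nat) (h : n < 128) :
    a = Char.ofNat n ↔ a.toNat = n := by
  constructor
  · rintro rfl; exact pv_toNat_ofNat_small n h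
  · intro h2
    apply Char.ext
    apply UInt32.toNat_inj.mp
    show a.toNat = (Char.ofNat n).toNat
    rw [pv_toNat_ofNat_small n h, h2]

theorem pv_counts_spec (l : List Char) (f : Nat → Nat) (n : Nat) :
    (l.foldl (fun f c => fun m => if m = c.toNat then f m + 1 else f m) f) n
      = f n + l.countP (fun c => n == c.toNat) := by
  induction l generalizing f with
  | nil => simp
  | cons c t ih =>
    simp only [List.foldl_cons, List.countP_cons, ih]
    by_cases hn : n = c.toNat <;> (simp [hn]; try omega)

theorem pv_count_flat (cnt : Nat → Nat) (k : Nat) (hk : k ≤ 128) (a : Char) :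
    ((List.range k).flatMap (fun b => List.replicate (cnt b) (Char.ofNat b))).count a
      = if a.toNat < k then cnt a.toNat else 0 := by
  induction k with
  | zero => simp
  | succ k ih =>
    rw [List.range_succ, List.flatMap_append, List.count_append,
        ih (by omega)]
    simp only [List.flatMap_cons, List.flatMap_nil, List.append_nil, List.count_replicate]
    by_cases hak : a.toNat = k
    · have ha : a = Char.ofNat k := (pv_char_eq_ofNat_iff a k (by omega)).mpr hak
      simp [← ha, hak]
    · have ha : ¬ (Char.ofNat k == a) = true := by
        simp only [beq_iff_eq]
        intro h; exact hak (((pv_char_eq_ofNat_iff a k (by omega)).mp h.symm))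
      rw [if_neg ha]
      by_cases h1 : a.toNat < k
      · rw [if_pos h1, if_pos (by omega)]; omega
      · rw [if_neg h1, if_neg (by omega)]

theorem pv_mem_flat (cnt : Nat → Nat) (k : Nat) (hk : k ≤ 128) (x : Char)
    (hx : x ∈ (List.range k).flatMap (fun b => List.replicate (cnt b) (Char.ofNat b))) :
    x.toNat < k := by
  obtain ⟨b, hb, hxb⟩ := List.mem_flatMap.mp hx
  have hbk : b < k := List.mem_range.mp hb
  have : x = Char.ofNat b := List.eq_of_mem_replicate hxb
  rw [this, pv_toNat_ofNat_small b (by omega)]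
  exact hbk

theorem pv_pairwise_flat (cnt : Nat → Nat) (k : Nat) (hk : k ≤ 128) :
    ((List.range k).flatMap (fun b => List.replicate (cnt b) (Char.ofNat b))).Pairwise (· ≤ ·) := by
  induction k with
  | zero => simp
  | succ k ih =>
    rw [List.range_succ, List.flatMap_append]
    refine List.pairwise_append.mpr ⟨ih (by omega), ?_, ?_⟩
    · simp only [List.flatMap_cons, List.flatMap_nil, List.append_nil]
      exact List.pairwise_replicate.mpr (Or.inr le_rfl)
    · intro x hx y hy
      have hxk : x.toNat < k := pv_mem_flat cnt k (by omega) x hx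
      have hyk : y = Char.ofNat k := by
        simp only [List.flatMap_cons, List.flatMap_nil, List.append_nil] at hy
        exact List.eq_of_mem_replicate hy
      have hyn : y.toNat = k := by rw [hyk]; exact pv_toNat_ofNat_small k (by omega)
      rw [Char.le_def]
      have hx' : x.val.toNat = x.toNat := rfl
      have hy' : y.val.toNat = y.toNat := rfl
      exact UInt32.le_iff_toNat_le.mpr (by omega)

-- ===== VERDICT (by name: the statement is the Claim_ definition above) =====
theorem beregn_representant_spec : Claim_equal_beregn_representant := by
  intro ord hdom
  unfold Spec_beregn_representant beregn_representant beregn_representant_alt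
  simp only [PySem.List.foldl_append_singleton_eq_self, List.nil_append]
  congr 1
  have hsmall : ∀ c ∈ ord.toList, c.toNat < 128 := by
    intro c hc
    have := List.all_eq_true.mp hdom c hc
    simp only [pvDomChar, Bool.or_eq_true, Bool.and_eq_true, decide_eq_true_eq,
      beq_iff_eq] at this
    omega
  apply PySem.List.sorted_id_eq_of_perm_of_pairwise
  · -- permutation, by comparing counts
    refine List.perm_iff_count.mpr fun a => ?_
    rw [pv_count_flat _ 128 le_rfl a]
    by_cases ha : a.toNat < 128
    · rw [if_pos ha, pv_counts_spec]
      simp only [Nat.zero_add]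
      rw [List.count_eq_countP]
      apply List.countP_congr
      intro c hc
      simp only [beq_iff_eq]
      constructor
      · intro h
        apply Char.ext
        exact UInt32.toNat_inj.mp h.symm
      · intro h; rw [h]
    · rw [if_neg ha]
      symm
      rw [List.count_eq_zero]
      intro hmem
      exact ha (hsmall a hmem)
  · exact pv_pairwise_flat _ 128 le_rfl
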